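-- pv_equiv track=rewrite | github.com/kriz-tech/LEET-CODE-SOLUTIONS | 1628-count-submatrices-with-all-ones/count-submatrices-with-all-ones.py | countHist
-- ===== SOURCE A (Python) =====
-- def countHist(h):
--     n = len(h)
--     st = []
--     sum_arr = [0] * n
--     ans = 0
--
--     for j  in range(n):
--         while st and h[st[-1]] >= h[j]:
--             st.pop()
--
--         if st:
--             prev = st[-1]
--             sum_arr[j] = sum_arr[prev] + h[j] * (j - prev)
--         else:
--             sum_arr[j] = h[j] * (j + 1)
--
--         ans += sum_arr[j]
--         st.append(j)
--     return ans
-- ===== SOURCE B (Python) =====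
-- def countHist(h):
--     n = len(h)
--     ans = 0
--     for j in range(n):
--         m = h[j]
--         for k in range(j, -1, -1):
--             m = min(m, h[k])
--             ans += m
--     return ans
-- ===== Notes on version B (the rewrite author's own statement) =====
-- stated objective: simpler
-- what changed: Replaces the monotonic stack with sum_arr DP by a direct nested backward scan: for each right endpoint j it accumulates the running minimum min(h[k..j]) over all left endpoints k, summing the same per-column rectangle counts.
import Mathlib
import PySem

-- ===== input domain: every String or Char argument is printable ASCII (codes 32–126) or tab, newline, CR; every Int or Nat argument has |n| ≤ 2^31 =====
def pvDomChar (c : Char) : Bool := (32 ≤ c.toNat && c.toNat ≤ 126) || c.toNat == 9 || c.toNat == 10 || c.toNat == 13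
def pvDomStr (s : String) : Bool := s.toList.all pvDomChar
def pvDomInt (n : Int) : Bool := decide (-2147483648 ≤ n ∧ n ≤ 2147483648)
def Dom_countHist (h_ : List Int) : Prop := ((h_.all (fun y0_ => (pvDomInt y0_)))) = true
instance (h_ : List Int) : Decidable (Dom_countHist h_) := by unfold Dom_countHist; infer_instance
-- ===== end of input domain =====

-- B changes the algorithm: instead of A's monotonic stack with the sum_arr DP, it sums the
-- running minimum min(h[k..j]) over all pairs k ≤ j by a direct nested backward scan (simpler, not faster).

-- ===== PORT A =====
-- `while st and h[st[-1]] >= h[j]: st.pop()`; st holds indices (top first), all in range,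
-- so `h[i]` is ported as `h_.getD i 0` (index always valid, exact).
def popWhileA (h_ : List Int) (x : Int) : List Nat → List Nat
  | [] => []
  | i :: st => if h_.getD i 0 ≥ x then popWhileA h_ x st else i :: st

-- one iteration of A's `for j in range(n)` loop; state = (st, sum_arr, ans)
def stepA (h_ : List Int) (s : List Nat × List Int × Int) (j : Nat) : List Nat × List Int × Int :=
  let st' := popWhileA h_ (h_.getD j 0) s.1
  let v : Int :=
    match st' with
    | [] => h_.getD j 0 * ((j : Int) + 1)
    | prev :: _ => s.2.1.getD prev 0 + h_.getD j 0 * ((j : Int) - (prev : Int))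
  (j :: st', s.2.1.set j v, s.2.2 + v)

def countHist (h_ : List Int) : Int :=
  ((List.range h_.length).foldl (stepA h_) ([], List.replicate h_.length 0, 0)).2.2

-- ===== PORT B =====
-- inner loop `m = h[j]; for k in range(j, -1, -1): m = min(m, h[k]); ans += m`
-- (j, k range over 0..n-1, so indexing via getD is exact); state = (m, partial ans)
def innerB (h_ : List Int) (j : Nat) : Int × Int :=
  (List.range (j+1)).reverse.foldl
    (fun (p : Int × Int) k => (min p.1 (h_.getD k 0), p.2 + min p.1 (h_.getD k 0)))
    (h_.getD j 0, 0)

def countHist_alt (h_ : List Int) : Int :=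
  (List.range h_.length).foldl (fun ans j => ans + (innerB h_ j).2) 0

-- ===== PRECONDITION & SPEC =====
def Spec_countHist (h_ : List Int) (out : Int) : Prop := out = countHist_alt h_
instance (h_ : List Int) (out : Int) : Decidable (Spec_countHist h_ out) := by unfold Spec_countHist; infer_instance

-- ===== CLAIM (what is proved, stated in full; the proofs are below) =====
def Claim_equal_countHist : Prop := ∀ (h_ : List Int), Dom_countHist h_ → Spec_countHist h_ (countHist h_)

-- ===== LEMMAS AND PROOFS =====

-- sum of running minima: sufAux m [x1,…,xk] = Σ_i min(m, x1, …, xi)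
def sufAux (m : Int) : List Int → Int
  | [] => 0
  | x :: xs => min m x + sufAux (min m x) xs

-- T p = Σ over suffixes s of p of (min s)  (the per-right-endpoint contribution)
def T (p : List Int) : Int :=
  match p.reverse with
  | [] => 0
  | x :: xs => sufAux x (x :: xs)

-- A's stack after processing h[0..j-1] (top first): indices i < j that are strict minima of h[i..j-1]
def canonP (h_ : List Int) (j : Nat) (i : Nat) : Bool :=
  decide (∀ m ∈ Finset.Ioo i j, h_.getD i 0 < h_.getD m 0)

def canon (h_ : List Int) (j : Nat) : List Nat :=
  ((List.range j).filter (canonP h_ j)).reverse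

def Bpartial (h_ : List Int) (j : Nat) : Int :=
  (List.range j).foldl (fun a i => a + T (h_.take (i+1))) 0

lemma sufAux_const (m : Int) (l : List Int) (hl : ∀ y ∈ l, m ≤ y) :
    sufAux m l = m * l.length := by
  induction l with
  | nil => simp [sufAux]
  | cons x xs ih =>
    have hx : m ≤ x := hl x (by simp)
    have : min m x = m := min_eq_left hx
    simp [sufAux, this, ih (fun y hy => hl y (by simp [hy]))]
    ring

lemma foldl_min_const (m : Int) (l : List Int) (hl : ∀ y ∈ l, m ≤ y) :
    l.foldl min m = m := by
  induction l generalizing m with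
  | nil => rfl
  | cons x xs ih =>
    have : min m x = m := min_eq_left (hl x (by simp))
    simp [List.foldl, this, ih m (fun y hy => hl y (by simp [hy]))]

lemma sufAux_append (m : Int) (l1 l2 : List Int) :
    sufAux m (l1 ++ l2) = sufAux m l1 + sufAux (l1.foldl min m) l2 := by
  induction l1 generalizing m with
  | nil => simp [sufAux]
  | cons x xs ih => simp [sufAux, List.foldl, ih]; ring

lemma T_concat (q : List Int) (x : Int) :
    T (q ++ [x]) = sufAux x (x :: q.reverse) := by
  simp [T]

lemma T_all_ge (q : List Int) (x : Int) (hq : ∀ y ∈ q, x ≤ y) :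
    T (q ++ [x]) = x * (q.length + 1) := by
  rw [T_concat]
  have : ∀ y ∈ x :: q.reverse, x ≤ y := by
    intro y hy
    rcases List.mem_cons.mp hy with h | h
    · simp [h]
    · exact hq y (List.mem_reverse.mp h)
  rw [sufAux_const x _ this]
  simp only [List.length_cons, List.length_reverse]
  push_cast
  ring

lemma T_prev (q1 : List Int) (z x : Int) (q2 : List Int) (hz : z < x)
    (hq2 : ∀ y ∈ q2, x ≤ y) :
    T ((q1 ++ [z]) ++ q2 ++ [x]) = T (q1 ++ [z]) + x * (q2.length + 1) := by
  have hrev : ((q1 ++ [z]) ++ q2).reverse = q2.reverse ++ z :: q1.reverse := by simp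
  rw [T_concat, hrev]
  have h1 : ∀ y ∈ x :: q2.reverse, x ≤ y := by
    intro y hy
    rcases List.mem_cons.mp hy with h | h
    · simp [h]
    · exact hq2 y (List.mem_reverse.mp h)
  have e1 : (x :: q2.reverse) ++ (z :: q1.reverse) = x :: (q2.reverse ++ z :: q1.reverse) := by simp
  rw [← e1, sufAux_append, sufAux_const x _ h1, foldl_min_const x _ h1]
  have hzx : min x z = z := min_eq_right (le_of_lt hz)
  have e2 : sufAux x (z :: q1.reverse) = z + sufAux z q1.reverse := by
    simp [sufAux, hzx]
  have e3 : T (q1 ++ [z]) = z + sufAux z q1.reverse := by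
    rw [T_concat]; simp [sufAux]
  rw [e1] at *
  rw [e2, e3]
  simp only [List.length_cons, List.length_reverse]
  push_cast
  ring

-- B's inner loop state fold equals (running min, accumulated sufAux)
lemma foldl_pair (l : List Int) (m a : Int) :
    l.foldl (fun (p : Int × Int) x => (min p.1 x, p.2 + min p.1 x)) (m, a)
      = (l.foldl min m, a + sufAux m l) := by
  induction l generalizing m a with
  | nil => simp [sufAux]
  | cons x xs ih => simp [List.foldl, sufAux, ih]; ring

lemma innerB_eq_T (h_ : List Int) (j : Nat) (hj : j < h_.length) :
    (innerB h_ j).2 = T (h_.take (j+1)) := by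
  have hmap : (List.range (j+1)).reverse.map (fun k => h_.getD k 0) = (h_.take (j+1)).reverse := by
    apply List.ext_getElem
    · simp [Nat.succ_le_of_lt hj]
    · intro i hi1 hi2
      simp only [List.getElem_map, List.getElem_reverse, List.getElem_range, List.length_reverse,
        List.length_map, List.length_range] at *
      rw [List.getElem_take]
      rw [List.getD_eq_getElem?_getD, List.getElem?_eq_getElem (by omega)]
      simp
      congr 1
      omega
  have : innerB h_ j
      = ((List.range (j+1)).reverse.map (fun k => h_.getD k 0)).foldl
          (fun (p : Int × Int) x => (min p.1 x, p.2 + min p.1 x)) (h_.getD j 0, 0) := by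
    rw [innerB, List.foldl_map]
  rw [this, hmap, foldl_pair]
  have htake : h_.take (j+1) = h_.take j ++ [h_.getD j 0] := by
    rw [List.getD_eq_getElem?_getD, List.getElem?_eq_getElem hj]
    simpa using (List.take_succ (l := h_) (i := j))
  rw [htake, T_concat]
  simp [sufAux]

-- membership characterization of canon
lemma mem_canon (h_ : List Int) (j : Nat) (i : Nat) :
    i ∈ canon h_ j ↔ (i < j ∧ ∀ m, i < m → m < j → h_.getD i 0 < h_.getD m 0) := by
  simp [canon, canonP, List.mem_filter, List.mem_range]

-- canon is strictly decreasing in index and in h-value (top of stack first)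
lemma canon_pairwise (h_ : List Int) (j : Nat) :
    (canon h_ j).Pairwise (fun a b => b < a ∧ h_.getD b 0 < h_.getD a 0) := by
  rw [canon, List.pairwise_reverse]
  have hsub : ((List.range j).filter (canonP h_ j)).Pairwise (· < ·) :=
    (List.pairwise_lt_range (n := j)).sublist List.filter_sublist
  refine hsub.imp_of_mem ?_
  intro a b ha hb hab
  refine ⟨hab, ?_⟩
  have hP := (List.mem_filter.mp ha).2
  have hbj : b < j := List.mem_range.mp (List.mem_filter.mp hb).1
  simp only [canonP, decide_eq_true_eq] at hP
  exact hP b (Finset.mem_Ioo.mpr ⟨hab, hbj⟩)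

lemma popWhileA_filter (h_ : List Int) (x : Int) (l : List Nat)
    (hl : l.Pairwise (fun a b => h_.getD b 0 < h_.getD a 0)) :
    popWhileA h_ x l = l.filter (fun i => decide (h_.getD i 0 < x)) := by
  induction l with
  | nil => rfl
  | cons i t ih =>
    rcases List.pairwise_cons.mp hl with ⟨hhead, htail⟩
    by_cases hx : h_.getD i 0 ≥ x
    · have hnl : ¬ (h_.getD i 0 < x) := not_lt.mpr hx
      rw [popWhileA, if_pos hx, ih htail, List.filter_cons_of_neg (by simpa using hnl)]
    · push_neg at hx
      have hrest : ∀ b ∈ t, h_.getD b 0 < x := fun b hb => lt_trans (hhead b hb) hx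
      have hself : t.filter (fun i => decide (h_.getD i 0 < x)) = t :=
        List.filter_eq_self.mpr (fun b hb => decide_eq_true (hrest b hb))
      rw [popWhileA, if_neg (not_le.mpr hx), List.filter_cons_of_pos (by simpa using hx), hself]

lemma canon_succ (h_ : List Int) (j : Nat) :
    canon h_ (j+1) = j :: (canon h_ j).filter (fun i => decide (h_.getD i 0 < h_.getD j 0)) := by
  unfold canon
  rw [List.range_succ, List.filter_append, List.filter_reverse]
  have hj : ([j].filter (canonP h_ (j+1))) = [j] := by
    have hP : canonP h_ (j+1) j = true := by
      apply decide_eq_true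
      intro m hm
      rcases Finset.mem_Ioo.mp hm with ⟨a, b⟩
      omega
    simp [hP]
  rw [hj, List.filter_filter]
  have hcongr : (List.range j).filter (canonP h_ (j+1))
      = (List.range j).filter (fun a => decide (h_.getD a 0 < h_.getD j 0) && canonP h_ j a) := by
    apply List.filter_congr
    intro a ha
    have haj : a < j := List.mem_range.mp ha
    simp only [canonP]
    rw [← Bool.decide_and, decide_eq_decide]
    constructor
    · intro hc
      refine ⟨hc j (Finset.mem_Ioo.mpr ⟨haj, Nat.lt_succ_self j⟩), ?_⟩
      intro m hm
      rcases Finset.mem_Ioo.mp hm with ⟨h1, h2⟩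
      exact hc m (Finset.mem_Ioo.mpr ⟨h1, Nat.lt_succ_of_lt h2⟩)
    · rintro ⟨h1, h2⟩
      intro m hm
      rcases Finset.mem_Ioo.mp hm with ⟨hm1, hm2⟩
      rcases Nat.lt_succ_iff_lt_or_eq.mp hm2 with hlt | heq
      · exact h2 m (Finset.mem_Ioo.mpr ⟨hm1, hlt⟩)
      · subst heq; exact h1
  rw [hcongr]
  simp

-- elements of the middle segment (indices in (prev, j)) of take (j+1)
lemma mem_drop_take (h_ : List Int) (p j : Nat) (y : Int)
    (hy : y ∈ (h_.take j).drop (p+1)) :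
    ∃ m, p < m ∧ m < j ∧ m < h_.length ∧ y = h_.getD m 0 := by
  rcases List.mem_iff_getElem.mp hy with ⟨i, hi, hget⟩
  have hlen : i < (h_.take j).length - (p+1) := by simpa using hi
  have hlen2 : (h_.take j).length ≤ h_.length := by simp
  refine ⟨p + 1 + i, by omega, ?_, ?_, ?_⟩
  · have : p + 1 + i < (h_.take j).length := by omega
    have := this; simp at this; omega
  · have : p + 1 + i < (h_.take j).length := by omega
    simp at this; omega
  · rw [List.getElem_drop] at hget
    rw [List.getElem_take] at hget
    rw [List.getD_eq_getElem?_getD]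
    rw [List.getElem?_eq_getElem]
    · simp [← hget]
    · have : p + 1 + i < (h_.take j).length := by omega
      simp at this; omega

-- the invariant for A's loop
def InvA (h_ : List Int) (j : Nat) (s : List Nat × List Int × Int) : Prop :=
  s.1 = canon h_ j ∧ s.2.1.length = h_.length ∧
  (∀ i, i < j → s.2.1.getD i 0 = T (h_.take (i+1))) ∧ s.2.2 = Bpartial h_ j

lemma stepA_inv (h_ : List Int) (j : Nat) (hj : j < h_.length)
    (s : List Nat × List Int × Int) (hs : InvA h_ j s) :
    InvA h_ (j+1) (stepA h_ s j) := by
  obtain ⟨hst, hlen, hsa, hans⟩ := hs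
  set x := h_.getD j 0 with hx
  have hpair : (canon h_ j).Pairwise (fun a b => h_.getD b 0 < h_.getD a 0) :=
    (canon_pairwise h_ j).imp (fun h => h.2)
  have hpop : popWhileA h_ x s.1 = (canon h_ j).filter (fun i => decide (h_.getD i 0 < x)) := by
    rw [hst]; exact popWhileA_filter h_ x _ hpair
  -- value computed at step j equals T (take (j+1))
  have hval : (match popWhileA h_ x s.1 with
      | [] => x * ((j : Int) + 1)
      | prev :: _ => s.2.1.getD prev 0 + x * ((j : Int) - (prev : Int))) = T (h_.take (j+1)) := by
    rw [hpop]
    rcases hEmp : (canon h_ j).filter (fun i => decide (h_.getD i 0 < x)) with _ | ⟨prev, rest⟩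
    · -- empty: every i < j has x ≤ h[i]
      have hgeAll : ∀ i, i < j → x ≤ h_.getD i 0 := by
        have key : ∀ d i, i < j → j - i ≤ d → x ≤ h_.getD i 0 := by
          intro d
          induction d with
          | zero => intro i hi hle; omega
          | succ d ih =>
            intro i hi hle
            by_cases hc : ∀ m, i < m → m < j → h_.getD i 0 < h_.getD m 0
            · have hmem : i ∈ canon h_ j := (mem_canon h_ j i).mpr ⟨hi, hc⟩
              by_contra hlt
              push_neg at hlt
              have : i ∈ (canon h_ j).filter (fun i => decide (h_.getD i 0 < x)) :=
                List.mem_filter.mpr ⟨hmem, decide_eq_true hlt⟩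
              rw [hEmp] at this; exact absurd this (List.not_mem_nil)
            · push_neg at hc
              obtain ⟨m, him, hmj, hge⟩ := hc
              exact le_trans (ih m hmj (by omega)) hge
        intro i hi; exact key (j - i) i hi le_rfl
      have htake : h_.take (j+1) = h_.take j ++ [x] := by
        rw [hx, List.getD_eq_getElem?_getD, List.getElem?_eq_getElem hj]
        simpa using (List.take_succ (l := h_) (i := j))
      rw [htake, T_all_ge]
      · simp [List.length_take, Nat.min_eq_left (le_of_lt hj)]
      · intro y hy
        rcases List.mem_iff_getElem.mp hy with ⟨i, hi, hget⟩
        have hi' : i < j := by have := hi; simp at this; omega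
        have : y = h_.getD i 0 := by
          rw [List.getElem_take] at hget
          rw [List.getD_eq_getElem?_getD, List.getElem?_eq_getElem (by have := hi; simp at this; omega : i < h_.length)]
          simp [← hget]
        rw [this]; exact hgeAll i hi'
    · -- nonempty: prev = largest index < j with h[prev] < x
      have hprevMem : prev ∈ (canon h_ j).filter (fun i => decide (h_.getD i 0 < x)) := by
        rw [hEmp]; simp
      have hprevCanon : prev ∈ canon h_ j := (List.mem_filter.mp hprevMem).1
      have hprevLt : h_.getD prev 0 < x := of_decide_eq_true (List.mem_filter.mp hprevMem).2
      obtain ⟨hprevJ, hprevCond⟩ := (mem_canon h_ j prev).mp hprevCanon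
      -- maximality of prev among the filter (filter is sorted descending; prev is its head)
      have hfilterPair : ((canon h_ j).filter (fun i => decide (h_.getD i 0 < x))).Pairwise (fun a b => b < a) :=
        ((canon_pairwise h_ j).imp (fun h => h.1)).sublist List.filter_sublist
      have hmax : ∀ m, prev < m → m < j → x ≤ h_.getD m 0 := by
        have key : ∀ d m, prev < m → m < j → j - m ≤ d → x ≤ h_.getD m 0 := by
          intro d
          induction d with
          | zero => intro m h1 h2 hle; omega
          | succ d ih =>
            intro m h1 h2 hle
            by_cases hc : ∀ m', m < m' → m' < j → h_.getD m 0 < h_.getD m' 0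
            · have hmem : m ∈ canon h_ j := (mem_canon h_ j m).mpr ⟨h2, hc⟩
              by_contra hlt
              push_neg at hlt
              have hmF : m ∈ (canon h_ j).filter (fun i => decide (h_.getD i 0 < x)) :=
                List.mem_filter.mpr ⟨hmem, decide_eq_true hlt⟩
              rw [hEmp] at hmF
              rcases List.mem_cons.mp hmF with he | ht
              · omega
              · have := (List.pairwise_cons.mp (hEmp ▸ hfilterPair)).1 m ht
                omega
            · push_neg at hc
              obtain ⟨m', h1', h2', hge⟩ := hc
              exact le_trans (ih m' (by omega) h2' (by omega)) hge
        intro m h1 h2; exact key (j - m) m h1 h2 le_rfl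
      -- decompose take (j+1) = (take prev ++ [z]) ++ mid ++ [x]
      set z := h_.getD prev 0 with hz
      have hprevH : prev < h_.length := lt_trans hprevJ hj
      have htakeP : h_.take (prev+1) = h_.take prev ++ [z] := by
        rw [hz, List.getD_eq_getElem?_getD, List.getElem?_eq_getElem hprevH]
        simpa using (List.take_succ (l := h_) (i := prev))
      set mid := (h_.take j).drop (prev+1) with hmid
      have hsplit : h_.take j = h_.take (prev+1) ++ mid := by
        rw [hmid]
        have : h_.take (prev+1) = (h_.take j).take (prev+1) := by
          rw [List.take_take]; congr 1; omega
        rw [this, List.take_append_drop]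
      have htake : h_.take (j+1) = (h_.take prev ++ [z]) ++ mid ++ [x] := by
        have h1 : h_.take (j+1) = h_.take j ++ [x] := by
          rw [hx, List.getD_eq_getElem?_getD, List.getElem?_eq_getElem hj]
          simpa using (List.take_succ (l := h_) (i := j))
        rw [h1, hsplit, htakeP]
      have hmidGe : ∀ y ∈ mid, x ≤ y := by
        intro y hy
        obtain ⟨m, h1, h2, _, h4⟩ := mem_drop_take h_ prev j y hy
        rw [h4]; exact hmax m h1 h2
      have hmidLen : mid.length = j - (prev + 1) := by
        rw [hmid]; simp [List.length_drop, Nat.min_eq_left (le_of_lt hj)]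
      have hred : (match prev :: rest with
          | [] => x * ((j : Int) + 1)
          | p :: _ => s.2.1.getD p 0 + x * ((j : Int) - (p : Int)))
          = s.2.1.getD prev 0 + x * ((j : Int) - (prev : Int)) := rfl
      rw [hred, htake, T_prev (h_.take prev) z x mid hprevLt hmidGe]
      rw [← htakeP, hsa prev (by omega), hmidLen]
      have : ((j - (prev+1) : Nat) : Int) + 1 = (j : Int) - (prev : Int) := by
        push_cast [Nat.cast_sub (by omega : prev + 1 ≤ j)]; ring
      rw [this]
  refine ⟨?_, ?_, ?_, ?_⟩
  · show j :: popWhileA h_ x s.1 = canon h_ (j+1)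
    rw [hpop, canon_succ]
  · simp [stepA, hlen]
  · intro i hi
    show (s.2.1.set j (match popWhileA h_ x s.1 with
      | [] => x * ((j : Int) + 1)
      | prev :: _ => s.2.1.getD prev 0 + x * ((j : Int) - (prev : Int)))).getD i 0 = _
    by_cases hij : i = j
    · subst hij
      rw [List.getD_eq_getElem?_getD, List.getElem?_set_self (by omega)]
      simpa using hval
    · rw [List.getD_eq_getElem?_getD, List.getElem?_set_ne (by omega)]
      rw [← List.getD_eq_getElem?_getD]
      exact hsa i (by omega)
  · show s.2.2 + (match popWhileA h_ x s.1 with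
      | [] => x * ((j : Int) + 1)
      | prev :: _ => s.2.1.getD prev 0 + x * ((j : Int) - (prev : Int))) = Bpartial h_ (j+1)
    rw [hval, hans, Bpartial, Bpartial, List.range_succ, List.foldl_append]
    simp

lemma invA_all (h_ : List Int) (j : Nat) (hj : j ≤ h_.length) :
    InvA h_ j ((List.range j).foldl (stepA h_) ([], List.replicate h_.length 0, 0)) := by
  induction j with
  | zero =>
    refine ⟨?_, ?_, ?_, ?_⟩ <;> simp [canon, Bpartial]
  | succ j ih =>
    rw [List.range_succ, List.foldl_append]
    simp only [List.foldl_cons, List.foldl_nil]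
    exact stepA_inv h_ j (by omega) _ (ih (by omega))

-- ===== VERDICT (by name: the statement is the Claim_ definition above) =====
theorem countHist_spec : Claim_equal_countHist := by
  intro h_ _
  show countHist h_ = countHist_alt h_
  have hinv := invA_all h_ h_.length le_rfl
  have hA : countHist h_ = Bpartial h_ h_.length := hinv.2.2.2
  have hB : countHist_alt h_ = Bpartial h_ h_.length := by
    unfold countHist_alt Bpartial
    apply List.foldl_ext
    intro a j hj
    rw [innerB_eq_T h_ j (List.mem_range.mp hj)]
  rw [hA, hB]
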